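-- pv_equiv track=rewrite | github.com/GundalaNikhil/DSA | practice-dsa-problems/Arrays/solutions/ARR-032-min-deletions-bitonic.py | get_lis_lengths
-- ===== SOURCE A (Python) =====
-- from bisect import bisect_left
--
-- def get_lis_lengths(arr):
--     n = len(arr)
--     if n == 0:
--         return []
--     lis = []
--     res = [0] * n
--     for i in range(n):
--         val = arr[i]
--         idx = bisect_left(lis, val)
--         if idx == len(lis):
--             lis.append(val)
--         else:
--             lis[idx] = val
--         res[i] = idx + 1
--     return res
-- ===== SOURCE B (Python) =====
-- def get_lis_lengths(arr):
--     res = []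
--     prev = []  # (value, LIS-length ending at that value) for each processed element
--     for v in arr:
--         best = 0
--         for (u, l) in prev:
--             if u < v and l > best:
--                 best = l
--         res.append(best + 1)
--         prev.append((v, best + 1))
--     return res
-- ===== Notes on version B (the rewrite author's own statement) =====
-- stated objective: alternative
-- what changed: Replaces the patience-sorting tails array with bisect by the naive quadratic DP that, for each element, scans all previously seen (value, length) pairs for the best strictly-smaller predecessor length.
import Mathlib
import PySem

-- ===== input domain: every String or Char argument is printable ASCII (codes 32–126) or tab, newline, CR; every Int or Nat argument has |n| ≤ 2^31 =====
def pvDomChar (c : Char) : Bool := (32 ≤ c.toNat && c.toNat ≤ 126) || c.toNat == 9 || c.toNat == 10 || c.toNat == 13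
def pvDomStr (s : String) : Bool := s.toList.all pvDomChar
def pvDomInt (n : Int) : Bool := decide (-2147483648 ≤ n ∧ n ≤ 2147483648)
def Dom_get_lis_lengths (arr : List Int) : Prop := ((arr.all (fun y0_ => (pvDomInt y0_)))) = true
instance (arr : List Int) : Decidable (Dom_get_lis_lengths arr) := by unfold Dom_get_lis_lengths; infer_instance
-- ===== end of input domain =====

-- B replaces A's patience-sorting tails array (bisect_left) by the naive quadratic DP over all
-- previously seen (value, length) pairs; same per-index LIS lengths, no speed claim.

-- ===== PORT A =====
-- loop body of A: val = arr[i]; idx = bisect_left(lis, val); append or overwrite; res[i] = idx + 1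
def aStep (arr : List Int) (st : List Int × List Int) (i : Int) : List Int × List Int :=
  let val := PySem.List.pyGetD arr i 0
  let idx := PySem.List.bisectLeft st.1 val
  let lis' := if idx = st.1.length then st.1 ++ [val] else st.1.set idx val
  (lis', PySem.List.pySetD st.2 i ((idx : Int) + 1))

def get_lis_lengths (arr : List Int) : List Int :=
  let n := arr.length
  if n = 0 then []
  else ((PySem.List.pyRange 0 (n : Int) 1).foldl (aStep arr) ([], List.replicate n 0)).2

-- ===== PORT B =====
-- inner loop of B: best = max of l over (u, l) in prev with u < v, default 0
def bBest (prev : List (Int × Int)) (v : Int) : Int :=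
  prev.foldl (fun b p => if p.1 < v ∧ b < p.2 then p.2 else b) 0

-- outer loop body of B: append best+1 to res and (v, best+1) to prev
def bStep (st : List Int × List (Int × Int)) (v : Int) : List Int × List (Int × Int) :=
  let best := bBest st.2 v
  (st.1 ++ [best + 1], st.2 ++ [(v, best + 1)])

def get_lis_lengths_alt (arr : List Int) : List Int :=
  (arr.foldl bStep ([], [])).1

-- ===== PRECONDITION & SPEC =====
def Spec_get_lis_lengths (arr : List Int) (out : List Int) : Prop := out = get_lis_lengths_alt arr
instance (arr : List Int) (out : List Int) : Decidable (Spec_get_lis_lengths arr out) := by unfold Spec_get_lis_lengths; infer_instance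

-- ===== CLAIM (what is proved, stated in full; the proofs are below) =====
def Claim_equal_get_lis_lengths : Prop := ∀ (arr : List Int), Dom_get_lis_lengths arr → Spec_get_lis_lengths arr (get_lis_lengths arr)

-- ===== LEMMAS AND PROOFS =====

-- Invariant tying B's list of processed (value, length) pairs to A's tails array `lis`:
-- lis is strictly increasing, every recorded length is in [1, |lis|], lis[k] is attained by some
-- pair of length k+1, and lis[k] is minimal among values of pairs of length k+1.
def LisInv (prev : List (Int × Int)) (lis : List Int) : Prop :=
  lis.Pairwise (· < ·) ∧
  (∀ p ∈ prev, 1 ≤ p.2 ∧ p.2 ≤ (lis.length : Int)) ∧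
  (∀ k, (hk : k < lis.length) → ∃ p ∈ prev, p.2 = (k : Int) + 1 ∧ p.1 = lis[k]) ∧
  (∀ p ∈ prev, ∀ k, (hk : k < lis.length) → p.2 = (k : Int) + 1 → lis[k] ≤ p.1)

def bFold (v : Int) (b0 : Int) (prev : List (Int × Int)) : Int :=
  prev.foldl (fun b p => if p.1 < v ∧ b < p.2 then p.2 else b) b0

lemma bBest_eq_bFold (prev : List (Int × Int)) (v : Int) : bBest prev v = bFold v 0 prev := rfl

lemma bFold_cons (v b0 : Int) (p : Int × Int) (t : List (Int × Int)) :
    bFold v b0 (p :: t) = bFold v (if p.1 < v ∧ b0 < p.2 then p.2 else b0) t := rfl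

lemma bFold_ge (v : Int) (prev : List (Int × Int)) : ∀ b0 : Int, b0 ≤ bFold v b0 prev := by
  induction prev with
  | nil => intro b0; simp [bFold]
  | cons p t ih =>
    intro b0
    rw [bFold_cons]
    refine le_trans ?_ (ih _)
    split
    · next h => exact le_of_lt h.2
    · exact le_rfl

lemma bFold_le (v c : Int) (prev : List (Int × Int)) :
    ∀ b0 : Int, b0 ≤ c → (∀ p ∈ prev, p.1 < v → p.2 ≤ c) → bFold v b0 prev ≤ c := by
  induction prev with
  | nil => intro b0 h0 _; simpa [bFold] using h0
  | cons p t ih =>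
    intro b0 h0 h
    rw [bFold_cons]
    refine ih _ ?_ (fun q hq => h q (List.mem_cons_of_mem _ hq))
    split
    · next hc => exact h p (List.mem_cons_self) hc.1
    · exact h0

lemma bFold_mem (v : Int) (prev : List (Int × Int)) (p : Int × Int) (hv : p.1 < v) :
    ∀ b0 : Int, p ∈ prev → p.2 ≤ bFold v b0 prev := by
  induction prev with
  | nil => intro b0 hp; cases hp
  | cons q t ih =>
    intro b0 hp
    rw [bFold_cons]
    rcases List.mem_cons.1 hp with rfl | hp'
    · refine le_trans ?_ (bFold_ge v t _)
      split
      · next h => exact le_rfl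
      · next h =>
        by_contra hlt
        exact h ⟨hv, by omega⟩
    · exact ih _ hp'

lemma best_eq_bisect (prev : List (Int × Int)) (lis : List Int) (v : Int) (h : LisInv prev lis) :
    bBest prev v = (PySem.List.bisectLeft lis v : Int) := by
  obtain ⟨hpw, hbnd, hex, hmin⟩ := h
  obtain ⟨hmle, hlt, hge⟩ := PySem.List.bisectLeft_spec lis v (hpw.imp le_of_lt)
  set m := PySem.List.bisectLeft lis v with hm
  rw [bBest_eq_bFold]
  apply le_antisymm
  · refine bFold_le _ _ _ 0 (by positivity) ?_
    intro p hp hpv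
    have hb := hbnd p hp
    by_contra hgt
    have hk : (p.2 - 1).toNat < lis.length := by omega
    have hmk : m ≤ (p.2 - 1).toNat := by omega
    have h1 := hge (p.2 - 1).toNat hk hmk
    have h2 := hmin p hp (p.2 - 1).toNat hk (by omega)
    omega
  · rcases Nat.eq_zero_or_pos m with hz | hpos
    · rw [hz]
      exact_mod_cast bFold_ge v prev 0
    · have hk : m - 1 < lis.length := by omega
      have hlt1 := hlt (m - 1) hk (by omega)
      obtain ⟨p, hp, h2, h1⟩ := hex (m - 1) hk
      have : p.2 ≤ bFold v 0 prev := bFold_mem v prev p (by omega) 0 hp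
      omega

lemma lisInv_nil : LisInv [] [] := by
  refine ⟨List.Pairwise.nil, ?_, ?_, ?_⟩ <;> simp

lemma lisInv_step (prev : List (Int × Int)) (lis : List Int) (v : Int) (h : LisInv prev lis) :
    LisInv (prev ++ [(v, (PySem.List.bisectLeft lis v : Int) + 1)])
        (if PySem.List.bisectLeft lis v = lis.length then lis ++ [v]
         else lis.set (PySem.List.bisectLeft lis v) v) := by
  obtain ⟨hpw, hbnd, hex, hmin⟩ := h
  obtain ⟨hmle, hlt, hge⟩ := PySem.List.bisectLeft_spec lis v (hpw.imp le_of_lt)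
  set m := PySem.List.bisectLeft lis v with hm
  by_cases hcase : m = lis.length
  · rw [if_pos hcase]
    refine ⟨?_, ?_, ?_, ?_⟩
    · rw [List.pairwise_iff_getElem] at hpw ⊢
      intro i j hi hj hij
      simp only [List.length_append, List.length_cons, List.length_nil] at hi hj
      by_cases hjl : j < lis.length
      · have hil : i < lis.length := lt_trans hij hjl
        rw [List.getElem_append_left hil, List.getElem_append_left hjl]
        exact hpw i j hil hjl hij
      · have hj' : j = lis.length := by omega
        have hil : i < lis.length := by omega
        rw [List.getElem_append_left hil]
        subst hj'
        rw [List.getElem_concat_length]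
        · exact hlt i hil (by omega)
        · rfl
    · intro p hp
      rcases List.mem_append.1 hp with hp | hp
      · have := hbnd p hp
        simp only [List.length_append, List.length_cons, List.length_nil]
        push_cast
        omega
      · simp only [List.mem_singleton] at hp
        subst hp
        simp only [List.length_append, List.length_cons, List.length_nil]
        push_cast
        omega
    · intro k hk
      simp only [List.length_append, List.length_cons, List.length_nil] at hk
      by_cases hkl : k < lis.length
      · obtain ⟨p, hp, h2, h1⟩ := hex k hkl
        exact ⟨p, List.mem_append_left _ hp, h2,
          by rw [List.getElem_append_left hkl]; exact h1⟩
      · have hk' : k = lis.length := by omega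
        refine ⟨(v, (m : Int) + 1), List.mem_append_right _ (by simp), ?_, ?_⟩
        · simp only
          omega
        · subst hk'
          simp only
          rw [List.getElem_concat_length]
          rfl
    · intro p hp k hk h2
      simp only [List.length_append, List.length_cons, List.length_nil] at hk
      rcases List.mem_append.1 hp with hp | hp
      · by_cases hkl : k < lis.length
        · rw [List.getElem_append_left hkl]
          exact hmin p hp k hkl h2
        · have := hbnd p hp
          exfalso
          omega
      · simp only [List.mem_singleton] at hp
        subst hp
        simp only at h2 ⊢
        have hk' : k = lis.length := by omega
        subst hk'
        rw [List.getElem_concat_length]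
        rfl
  · rw [if_neg hcase]
    have hmlt : m < lis.length := lt_of_le_of_ne hmle hcase
    refine ⟨?_, ?_, ?_, ?_⟩
    · rw [List.pairwise_iff_getElem] at hpw ⊢
      intro i j hi hj hij
      simp only [List.length_set] at hi hj
      rw [List.getElem_set, List.getElem_set]
      split
      · next h1 =>
        split
        · next h2 => omega
        · next h2 =>
          have : v ≤ lis[m] := hge m hmlt le_rfl
          have : lis[m] < lis[j] := hpw m j hmlt hj (by omega)
          omega
      · next h1 =>
        split
        · next h2 =>
          exact hlt i hi (by omega)
        · next h2 => exact hpw i j hi hj hij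
    · intro p hp
      simp only [List.length_set]
      rcases List.mem_append.1 hp with hp | hp
      · exact hbnd p hp
      · simp only [List.mem_singleton] at hp
        subst hp
        simp only
        omega
    · intro k hk
      simp only [List.length_set] at hk
      by_cases hkm : k = m
      · refine ⟨(v, (m : Int) + 1), List.mem_append_right _ (by simp), by simp only; omega, ?_⟩
        simp only
        rw [List.getElem_set]
        simp [hkm]
      · obtain ⟨p, hp, h2, h1⟩ := hex k hk
        refine ⟨p, List.mem_append_left _ hp, h2, ?_⟩
        rw [List.getElem_set]
        simp only [if_neg (fun hh : m = k => hkm hh.symm)]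
        exact h1
    · intro p hp k hk h2
      simp only [List.length_set] at hk
      rcases List.mem_append.1 hp with hp | hp
      · rw [List.getElem_set]
        by_cases hkm : m = k
        · subst hkm
          have h3 : lis[m] ≤ p.1 := hmin p hp m hmlt h2
          have h4 : v ≤ lis[m] := hge m hmlt le_rfl
          omega
        · simp only [if_neg hkm]
          exact hmin p hp k hk h2
      · simp only [List.mem_singleton] at hp
        subst hp
        simp only at h2 ⊢
        have hk' : k = m := by omega
        subst hk'
        rw [List.getElem_set]
        simp
    

lemma set_append_len {α : Type} (l1 r : List α) (y : α) :
    (l1 ++ r).set l1.length y = l1 ++ r.set 0 y := by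
  induction l1 with
  | nil => simp
  | cons a t ih => simp [ih]

lemma main_inv (arr : List Int) :
    ∀ i : Nat, i ≤ arr.length →
      ((PySem.List.pyRange 0 (i : Int) 1).foldl (aStep arr) ([], List.replicate arr.length 0)).2
        = ((arr.take i).foldl bStep ([], [])).1 ++ List.replicate (arr.length - i) 0
      ∧ ((arr.take i).foldl bStep ([], [])).1.length = i
      ∧ LisInv ((arr.take i).foldl bStep ([], [])).2
            ((PySem.List.pyRange 0 (i : Int) 1).foldl (aStep arr) ([], List.replicate arr.length 0)).1 := by
  intro i
  induction i with
  | zero =>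
    intro _
    rw [show ((0 : Nat) : Int) = 0 from rfl, PySem.List.pyRange_one_eq_nil le_rfl]
    refine ⟨by simp, by simp, ?_⟩
    simpa using lisInv_nil
  | succ i ih =>
    intro hi1
    have hin : i < arr.length := by omega
    obtain ⟨hres, hlen, hinv⟩ := ih (by omega)
    have hrange : PySem.List.pyRange 0 ((i + 1 : Nat) : Int) 1
        = PySem.List.pyRange 0 (i : Int) 1 ++ [(i : Int)] := by
      have hc : ((i + 1 : Nat) : Int) = (i : Int) + 1 := by push_cast; ring
      rw [hc, PySem.List.pyRange_one_succ_right (by positivity)]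
    have htake : arr.take (i + 1) = arr.take i ++ [arr[i]] := by
      rw [List.take_add_one]
      simp [List.getElem?_eq_getElem hin]
    set stA := (PySem.List.pyRange 0 (i : Int) 1).foldl (aStep arr) ([], List.replicate arr.length 0) with hstA
    set stB := (arr.take i).foldl bStep ([], []) with hstB
    have hvA : PySem.List.pyGetD arr (i : Int) 0 = arr[i] := by
      rw [PySem.List.pyGetD_natCast]
      exact List.getD_eq_getElem arr 0 hin
    have hbest : bBest stB.2 arr[i] = (PySem.List.bisectLeft stA.1 arr[i] : Int) :=
      best_eq_bisect stB.2 stA.1 arr[i] hinv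
    set m := PySem.List.bisectLeft stA.1 arr[i] with hm
    have hstepA : (PySem.List.pyRange 0 ((i + 1 : Nat) : Int) 1).foldl (aStep arr)
        ([], List.replicate arr.length 0) = aStep arr stA (i : Int) := by
      rw [hrange, List.foldl_append, List.foldl_cons, List.foldl_nil, hstA]
    have hstepB : (arr.take (i + 1)).foldl bStep ([], []) = bStep stB arr[i] := by
      rw [htake, List.foldl_append, List.foldl_cons, List.foldl_nil, hstB]
    have haval : aStep arr stA (i : Int)
        = (if m = stA.1.length then stA.1 ++ [arr[i]] else stA.1.set m arr[i],
           PySem.List.pySetD stA.2 (i : Int) ((m : Int) + 1)) := by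
      simp only [aStep, hvA, ← hm]
    have hbval : bStep stB arr[i]
        = (stB.1 ++ [(m : Int) + 1], stB.2 ++ [(arr[i], (m : Int) + 1)]) := by
      simp only [bStep, hbest, hm]
    have hrep : List.replicate (arr.length - i) (0 : Int)
        = 0 :: List.replicate (arr.length - (i + 1)) 0 := by
      have : arr.length - i = (arr.length - (i + 1)) + 1 := by omega
      rw [this, List.replicate_succ]
    have hset : PySem.List.pySetD stA.2 (i : Int) ((m : Int) + 1)
        = (stB.1 ++ [(m : Int) + 1]) ++ List.replicate (arr.length - (i + 1)) 0 := by
      rw [PySem.List.pySetD_natCast, hres, hrep, ← hlen, set_append_len]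
      simp
    refine ⟨?_, ?_, ?_⟩
    · rw [hstepA, hstepB, haval, hbval, hset]
    · rw [hstepB, hbval]
      simp [hlen]
    · rw [hstepA, hstepB, haval, hbval]
      simpa using lisInv_step stB.2 stA.1 arr[i] hinv

-- ===== VERDICT (by name: the statement is the Claim_ definition above) =====
theorem get_lis_lengths_spec : Claim_equal_get_lis_lengths := by
  intro arr _
  unfold Spec_get_lis_lengths get_lis_lengths get_lis_lengths_alt
  by_cases h0 : arr.length = 0
  · have harr : arr = [] := List.eq_nil_of_length_eq_zero h0
    subst harr
    simp
  · simp only [h0]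
    obtain ⟨hres, _, _⟩ := main_inv arr arr.length le_rfl
    rw [List.take_length] at hres
    simpa using hres
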